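-- pv_equiv track=rewrite | github.com/jaredaivory/advent_of_code_2024 | solutions/day_05.py | is_correctly_ordered
-- ===== SOURCE A (Python) =====
-- from typing import List, Tuple, Mapping, Set, Optional
--
-- def is_correctly_ordered(ordering_hash_set: Mapping[int, Set[int]], update: List[int]) -> bool:
--     current_set = set()
--     for val in update[::-1]:
--         if val in current_set:
--             break
--         if val in ordering_hash_set:
--             current_set |= ordering_hash_set[val]
--         else:
--             current_set.add(val)
--     else:
--         return True
--     return False
-- ===== SOURCE B (Python) =====
-- from typing import List, Mapping, Set
--
-- def is_correctly_ordered(ordering_hash_set: Mapping[int, Set[int]], update: List[int]) -> bool: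
--     for j in range(len(update)):
--         after = ordering_hash_set.get(update[j], {update[j]})
--         for i in range(j):
--             if update[i] in after:
--                 return False
--     return True
-- ===== Notes on version B (the rewrite author's own statement) =====
-- stated objective: alternative
-- what changed: Replaces A's backward scan accumulating a growing set of forbidden values with a direct nested pairwise check: for each position j, every earlier element is tested against update[j]'s successor set (or {update[j]} if it has no rule), with no accumulated set at all.
import Mathlib
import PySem

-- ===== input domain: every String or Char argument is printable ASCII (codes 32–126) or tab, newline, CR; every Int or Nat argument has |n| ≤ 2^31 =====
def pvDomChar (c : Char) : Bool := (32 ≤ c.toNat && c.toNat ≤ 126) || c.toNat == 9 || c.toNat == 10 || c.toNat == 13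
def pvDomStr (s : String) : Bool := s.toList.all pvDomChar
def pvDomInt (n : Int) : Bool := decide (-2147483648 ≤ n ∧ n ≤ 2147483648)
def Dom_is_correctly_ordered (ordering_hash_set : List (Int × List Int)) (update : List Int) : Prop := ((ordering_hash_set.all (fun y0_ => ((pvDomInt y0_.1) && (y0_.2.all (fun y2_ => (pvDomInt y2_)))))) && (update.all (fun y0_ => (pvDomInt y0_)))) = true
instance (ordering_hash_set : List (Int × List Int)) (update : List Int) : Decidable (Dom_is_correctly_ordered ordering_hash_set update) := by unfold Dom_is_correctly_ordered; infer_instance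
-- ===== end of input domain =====

-- B replaces A's backward scan with an accumulated set of forbidden values by a direct
-- nested pairwise check (each earlier element against the current element's successor set);
-- alternative decomposition, no accumulated state.

-- ===== PORT A =====
-- A's loop over update[::-1]: break -> false, loop exhausted (for-else) -> true
def icoA_loop (ordering_hash_set : List (Int × List Int)) : List Int → PySem.Set Int → Bool
  | [], _ => true
  | v :: rest, current_set =>
    if PySem.Set.contains current_set v then false
    else
      match (PySem.Dict.mk ordering_hash_set).get? v with
      | some s => icoA_loop ordering_hash_set rest (PySem.Set.union current_set s)
      | none => icoA_loop ordering_hash_set rest (PySem.Set.add current_set v)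

def is_correctly_ordered (ordering_hash_set : List (Int × List Int)) (update : List Int) : Bool :=
  icoA_loop ordering_hash_set update.reverse PySem.Set.empty

-- ===== PORT B =====
-- B's outer loop over j with inner loop over i < j, carried as (prefix update[:j], rest update[j:])
def icoB_nest (ordering_hash_set : List (Int × List Int)) : List Int → List Int → Bool
  | _, [] => true
  | pre, v :: rest =>
    let after := ((PySem.Dict.mk ordering_hash_set).get? v).getD [v]
    if pre.any (fun x => after.contains x) then false
    else icoB_nest ordering_hash_set (pre ++ [v]) rest

def is_correctly_ordered_alt (ordering_hash_set : List (Int × List Int)) (update : List Int) : Bool :=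
  icoB_nest ordering_hash_set [] update

-- ===== PRECONDITION & SPEC =====
def Spec_is_correctly_ordered (ordering_hash_set : List (Int × List Int)) (update : List Int) (out : Bool) : Prop := out = is_correctly_ordered_alt ordering_hash_set update
instance (ordering_hash_set : List (Int × List Int)) (update : List Int) (out : Bool) : Decidable (Spec_is_correctly_ordered ordering_hash_set update out) := by unfold Spec_is_correctly_ordered; infer_instance

-- ===== CLAIM =====
def Claim_equal_is_correctly_ordered : Prop := ∀ (ordering_hash_set : List (Int × List Int)) (update : List Int), Dom_is_correctly_ordered ordering_hash_set update → Spec_is_correctly_ordered ordering_hash_set update (is_correctly_ordered ordering_hash_set update)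

-- ===== LEMMAS AND PROOFS =====

-- the "contribution" of a value: its successor set if it has a rule, else the value itself
def icoC (ordering_hash_set : List (Int × List Int)) (v : Int) : List Int :=
  ((PySem.Dict.mk ordering_hash_set).get? v).getD [v]

theorem icoA_loop_iff (ohs : List (Int × List Int)) (l : List Int) (cur : PySem.Set Int) :
    icoA_loop ohs l cur = true ↔
      (∀ v ∈ l, v ∉ cur) ∧ l.Pairwise (fun a b => b ∉ icoC ohs a) := by
  induction l generalizing cur with
  | nil => simp [icoA_loop]
  | cons v rest ih =>
    by_cases hv : v ∈ cur
    · have hc : PySem.Set.contains cur v = true := (PySem.Set.contains_iff cur v).2 hv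
      simp only [icoA_loop, hc, if_true, Bool.false_eq_true, false_iff]
      rintro ⟨h1, _⟩
      exact h1 v (List.mem_cons_self) hv
    · have hc : PySem.Set.contains cur v = false := by
        rw [Bool.eq_false_iff]
        intro ht
        exact hv ((PySem.Set.contains_iff cur v).1 ht)
      cases h : (PySem.Dict.mk ohs).get? v with
      | some s =>
        have hC : icoC ohs v = s := by simp [icoC, h]
        simp only [icoA_loop, hc, Bool.false_eq_true, if_false, h, ih]
        constructor
        · rintro ⟨h1, h2⟩
          refine ⟨?_, List.pairwise_cons.2 ⟨?_, h2⟩⟩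
          · intro w hw
            rcases List.mem_cons.1 hw with rfl | hw'
            · exact hv
            · exact fun hwc => h1 w hw' ((PySem.Set.mem_union cur s w).2 (Or.inl hwc))
          · intro b hb
            rw [hC]
            exact fun hbs => h1 b hb ((PySem.Set.mem_union cur s b).2 (Or.inr hbs))
        · rintro ⟨h1, h2⟩
          rcases List.pairwise_cons.1 h2 with ⟨h2a, h2b⟩
          refine ⟨?_, h2b⟩
          intro w hw hwu
          rcases (PySem.Set.mem_union cur s w).1 hwu with hwc | hws
          · exact h1 w (List.mem_cons_of_mem _ hw) hwc
          · exact (hC ▸ h2a w hw) hws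
      | none =>
        have hC : icoC ohs v = [v] := by simp [icoC, h]
        simp only [icoA_loop, hc, Bool.false_eq_true, if_false, h, ih]
        constructor
        · rintro ⟨h1, h2⟩
          refine ⟨?_, List.pairwise_cons.2 ⟨?_, h2⟩⟩
          · intro w hw
            rcases List.mem_cons.1 hw with rfl | hw'
            · exact hv
            · exact fun hwc => h1 w hw' ((PySem.Set.mem_add cur v w).2 (Or.inl hwc))
          · intro b hb
            rw [hC]
            exact fun hbv => h1 b hb ((PySem.Set.mem_add cur v b).2 (Or.inr (List.mem_singleton.1 hbv)))
        · rintro ⟨h1, h2⟩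
          rcases List.pairwise_cons.1 h2 with ⟨h2a, h2b⟩
          refine ⟨?_, h2b⟩
          intro w hw hwu
          rcases (PySem.Set.mem_add cur v w).1 hwu with hwc | rfl
          · exact h1 w (List.mem_cons_of_mem _ hw) hwc
          · exact (hC ▸ h2a w hw) (List.mem_singleton.2 rfl)

theorem icoB_nest_iff (ohs : List (Int × List Int)) (l pre : List Int) :
    icoB_nest ohs pre l = true ↔
      (∀ x ∈ pre, ∀ b ∈ l, x ∉ icoC ohs b) ∧ l.Pairwise (fun a b => a ∉ icoC ohs b) := by
  induction l generalizing pre with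
  | nil => simp [icoB_nest]
  | cons v rest ih =>
    have hC : ((PySem.Dict.mk ohs).get? v).getD [v] = icoC ohs v := rfl
    by_cases hA : ∃ x ∈ pre, x ∈ icoC ohs v
    · have hany : pre.any (fun x => (icoC ohs v).contains x) = true := by
        rcases hA with ⟨x, hx, hxc⟩
        exact List.any_eq_true.2 ⟨x, hx, List.contains_iff_mem.2 hxc⟩
      simp only [icoB_nest, hC, hany, if_true, Bool.false_eq_true, false_iff]
      rcases hA with ⟨x, hx, hxc⟩
      rintro ⟨h1, _⟩
      exact h1 x hx v (List.mem_cons_self) hxc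
    · have hany : pre.any (fun x => (icoC ohs v).contains x) = false := by
        rw [Bool.eq_false_iff]
        intro ht
        rcases List.any_eq_true.1 ht with ⟨x, hx, hxc⟩
        exact hA ⟨x, hx, List.contains_iff_mem.1 hxc⟩
      simp only [icoB_nest, hC, hany, Bool.false_eq_true, if_false, ih]
      push_neg at hA
      constructor
      · rintro ⟨h1, h2⟩
        refine ⟨?_, List.pairwise_cons.2 ⟨?_, h2⟩⟩
        · intro x hx b hb
          rcases List.mem_cons.1 hb with rfl | hb'
          · exact hA x hx
          · exact h1 x (List.mem_append_left _ hx) b hb'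
        · intro b hb
          exact h1 v (List.mem_append_right _ (List.mem_singleton.2 rfl)) b hb
      · rintro ⟨h1, h2⟩
        rcases List.pairwise_cons.1 h2 with ⟨h2a, h2b⟩
        refine ⟨?_, h2b⟩
        intro x hx b hb
        rcases List.mem_append.1 hx with hx' | hx'
        · exact h1 x hx' b (List.mem_cons_of_mem _ hb)
        · exact (List.mem_singleton.1 hx') ▸ h2a b hb

-- ===== VERDICT =====
theorem is_correctly_ordered_spec : Claim_equal_is_correctly_ordered := by
  intro ohs update _
  unfold Spec_is_correctly_ordered is_correctly_ordered is_correctly_ordered_alt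
  rw [Bool.eq_iff_iff, icoA_loop_iff, icoB_nest_iff, List.pairwise_reverse]
  simp [PySem.Set.empty]
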